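-- pv_equiv track=rewrite | github.com/slapointe/open-agent-kit | src/open_agent_kit/features/codebase_intelligence/daemon/middleware.py | _is_auth_exempt
-- ===== SOURCE A (Python) =====
-- _AUTH_EXEMPT_PREFIXES: tuple[str, ...] = (
--     "/static/",
--     "/favicon.png",
--     "/logo.png",
-- )
--
-- _DASHBOARD_ROUTES: tuple[str, ...] = (
--     "/",
--     "/ui",
--     "/search",
--     "/logs",
--     "/config",
--     "/help",
--     "/activity",
--     "/devtools",
--     "/team",
--     "/agents",
-- )
--
-- def _is_auth_exempt(path: str, method: str) -> bool:
--     """Check if a request path is exempt from token authentication.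
--
--     Exempt paths include:
--     - GET /api/health (liveness probe)
--     - Static assets (/static/*, /favicon.png, /logo.png)
--     - Dashboard HTML routes (/, /ui, /search, etc. and their sub-routes)
--     - Any non-/api/ path not covered above (future-proof)
--
--     Args:
--         path: The request URL path.
--         method: The HTTP method (GET, POST, etc.).
--
--     Returns:
--         True if the request should bypass authentication.
--     """
--     # Health endpoint is always accessible (liveness probes, CLI health checks)
--     if path == "/api/health" and method == "GET":
--         return True
--
--     # Non-API paths: static assets, favicon, logo
--     for prefix in _AUTH_EXEMPT_PREFIXES:
--         if path.startswith(prefix):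
--             return True
--
--     # Dashboard HTML routes (exact or prefix with /)
--     for route in _DASHBOARD_ROUTES:
--         if path == route or path.startswith(route + "/"):
--             return True
--
--     # Only /api/* paths require auth; anything else passes through
--     if not path.startswith("/api/"):
--         return True
--
--     return False
-- ===== SOURCE B (Python) =====
-- def _is_auth_exempt(path: str, method: str) -> bool:
--     # No exempt prefix or dashboard route starts with "/api/", so those scans only
--     # ever match non-"/api/" paths, which the final fall-through accepts anyway.
--     return (path == "/api/health" and method == "GET") or not path.startswith("/api/")
-- ===== Notes on version B (the rewrite author's own statement) =====
-- stated objective: simpler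
-- what changed: Both loops over the exempt-prefix and dashboard-route tuples are dead code (no entry starts with '/api/', and non-'/api/' paths already pass the final check), so the body collapses to one boolean expression with no iteration.
import Mathlib
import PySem

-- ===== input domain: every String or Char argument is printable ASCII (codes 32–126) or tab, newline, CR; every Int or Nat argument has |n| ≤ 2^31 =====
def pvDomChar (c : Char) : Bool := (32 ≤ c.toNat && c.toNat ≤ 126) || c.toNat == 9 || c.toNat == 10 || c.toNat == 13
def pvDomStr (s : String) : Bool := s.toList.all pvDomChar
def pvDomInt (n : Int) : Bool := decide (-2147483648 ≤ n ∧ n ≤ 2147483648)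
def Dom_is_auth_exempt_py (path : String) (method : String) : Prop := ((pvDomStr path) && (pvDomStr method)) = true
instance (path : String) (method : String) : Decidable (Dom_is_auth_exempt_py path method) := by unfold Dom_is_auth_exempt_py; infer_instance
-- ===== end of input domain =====

-- B collapses A's two dead pattern loops into one boolean guard (objective: simpler).

-- ===== PORT A =====
def pvAuthExemptPrefixes : List String := ["/static/", "/favicon.png", "/logo.png"]

def pvDashboardRoutes : List String :=
  ["/", "/ui", "/search", "/logs", "/config", "/help", "/activity", "/devtools", "/team", "/agents"]

-- 'for prefix in _AUTH_EXEMPT_PREFIXES: if path.startswith(prefix): return True'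
def pvPrefixLoop (path : String) : List String → Bool
  | [] => false
  | p :: rest => if PySem.Str.startswith path p then true else pvPrefixLoop path rest

-- 'for route in _DASHBOARD_ROUTES: if path == route or path.startswith(route + "/"): return True'
def pvRouteLoop (path : String) : List String → Bool
  | [] => false
  | r :: rest =>
      if path == r || PySem.Str.startswith path (r ++ "/") then true else pvRouteLoop path rest

def is_auth_exempt_py (path : String) (method : String) : Bool :=
  if path == "/api/health" && method == "GET" then true
  else if pvPrefixLoop path pvAuthExemptPrefixes then true
  else if pvRouteLoop path pvDashboardRoutes then true
  else if !(PySem.Str.startswith path "/api/") then true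
  else false

-- ===== PORT B =====
def is_auth_exempt_py_alt (path : String) (method : String) : Bool :=
  (path == "/api/health" && method == "GET") || !(PySem.Str.startswith path "/api/")

-- ===== PRECONDITION & SPEC =====
def Spec_is_auth_exempt_py (path : String) (method : String) (out : Bool) : Prop := out = is_auth_exempt_py_alt path method
instance (path : String) (method : String) (out : Bool) : Decidable (Spec_is_auth_exempt_py path method out) := by unfold Spec_is_auth_exempt_py; infer_instance

-- ===== CLAIM (what is proved, stated in full; the proofs are below) =====
def Claim_equal_is_auth_exempt_py : Prop := ∀ (path : String) (method : String), Dom_is_auth_exempt_py path method → Spec_is_auth_exempt_py path method (is_auth_exempt_py path method)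

-- ===== LEMMAS AND PROOFS =====

-- If path starts with "/api/", no pattern that is incomparable with "/api/" can be a prefix of path.
theorem pvSwFalse (path q : String)
    (hp : ("/api/".toList : List Char) <+: path.toList)
    (h1 : ¬ (("/api/".toList : List Char) <+: q.toList))
    (h2 : ¬ (q.toList <+: ("/api/".toList : List Char))) :
    PySem.Str.startswith path q = false := by
  rw [← Bool.not_eq_true]
  intro hq
  have hq' : q.toList <+: path.toList := by
    simpa [PySem.Chars.startswith_iff] using hq
  rcases List.prefix_or_prefix_of_prefix hq' hp with h | h
  · exact h2 h
  · exact h1 h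

theorem pvEqFalse (path q : String)
    (hp : ("/api/".toList : List Char) <+: path.toList)
    (h1 : ¬ (("/api/".toList : List Char) <+: q.toList)) :
    (path == q) = false := by
  rw [← Bool.not_eq_true]
  intro hq
  have : path = q := by simpa using hq
  subst this
  exact h1 hp

-- ===== VERDICT (by name: the statement is the Claim_ definition above) =====
theorem is_auth_exempt_py_spec : Claim_equal_is_auth_exempt_py := by
  intro path method _
  unfold Spec_is_auth_exempt_py is_auth_exempt_py is_auth_exempt_py_alt
  by_cases h : PySem.Str.startswith path "/api/" = true
  · have hp : ("/api/".toList : List Char) <+: path.toList := by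
      simpa [PySem.Chars.startswith_iff] using h
    have hPre : pvPrefixLoop path pvAuthExemptPrefixes = false := by
      simp only [pvAuthExemptPrefixes, pvPrefixLoop,
        pvSwFalse path "/static/" hp (by decide) (by decide),
        pvSwFalse path "/favicon.png" hp (by decide) (by decide),
        pvSwFalse path "/logo.png" hp (by decide) (by decide)]
      simp
    have hRoute : pvRouteLoop path pvDashboardRoutes = false := by
      simp only [pvDashboardRoutes, pvRouteLoop,
        pvEqFalse path "/" hp (by decide), pvEqFalse path "/ui" hp (by decide),
        pvEqFalse path "/search" hp (by decide), pvEqFalse path "/logs" hp (by decide),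
        pvEqFalse path "/config" hp (by decide), pvEqFalse path "/help" hp (by decide),
        pvEqFalse path "/activity" hp (by decide), pvEqFalse path "/devtools" hp (by decide),
        pvEqFalse path "/team" hp (by decide), pvEqFalse path "/agents" hp (by decide),
        pvSwFalse path ("/" ++ "/") hp (by decide) (by decide),
        pvSwFalse path ("/ui" ++ "/") hp (by decide) (by decide),
        pvSwFalse path ("/search" ++ "/") hp (by decide) (by decide),
        pvSwFalse path ("/logs" ++ "/") hp (by decide) (by decide),
        pvSwFalse path ("/config" ++ "/") hp (by decide) (by decide),
        pvSwFalse path ("/help" ++ "/") hp (by decide) (by decide),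
        pvSwFalse path ("/activity" ++ "/") hp (by decide) (by decide),
        pvSwFalse path ("/devtools" ++ "/") hp (by decide) (by decide),
        pvSwFalse path ("/team" ++ "/") hp (by decide) (by decide),
        pvSwFalse path ("/agents" ++ "/") hp (by decide) (by decide)]
      simp
    rw [hPre, hRoute, h]
    split_ifs <;> simp_all
  · have h' : PySem.Str.startswith path "/api/" = false := by
      simpa using h
    rw [h']
    split_ifs <;> simp_all
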